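-- pv_equiv track=rewrite | github.com/AI-Trading-Collaboration/AITradingSystem | src/ai_trading_system/official_policy_sources.py | _risk_mapping_for
-- ===== SOURCE A (Python) =====
-- from collections.abc import Mapping, Sequence
--
-- def _risk_mapping_for(
--     topics: tuple[str, ...],
--     text: str,
-- ) -> tuple[tuple[str, ...], tuple[str, ...], tuple[str, ...]]:
--     risk_ids: list[str] = []
--     nodes: list[str] = []
--     tickers: list[str] = []
--     topic_set = set(topics)
--     if topic_set & {"export_controls", "sanctions", "china_technology", "ai_policy"}:
--         risk_ids.append("ai_chip_export_control_upgrade")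
--         nodes.extend(("export_controls", "gpu_asic_demand", "semiconductor_equipment"))
--         tickers.extend(("NVDA", "AMD", "TSM", "INTC"))
--     if "taiwan_geopolitics" in topic_set:
--         risk_ids.append("taiwan_geopolitical_escalation")
--         nodes.extend(("foundry_demand", "advanced_packaging", "export_controls"))
--         tickers.extend(("TSM", "NVDA", "AMD", "SMH", "SOXX"))
--     if "trade_policy" in topic_set:
--         nodes.append("export_controls")
--     upper_text = text.upper()
--     for ticker in ("NVDA", "AMD", "TSM", "INTC", "ASML", "SMH", "SOXX", "MSFT", "GOOG"):
--         if ticker in upper_text: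
--             tickers.append(ticker)
--     return (
--         _dedupe_tuple(risk_ids),
--         _dedupe_tuple(tickers),
--         _dedupe_tuple(nodes),
--     )
--
-- def _dedupe_tuple(values: Sequence[str]) -> tuple[str, ...]:
--     seen: set[str] = set()
--     result: list[str] = []
--     for value in values:
--         if value and value not in seen:
--             seen.add(value)
--             result.append(value)
--     return tuple(result)
-- ===== SOURCE B (Python) =====
-- _WATCHLIST = ("NVDA", "AMD", "TSM", "INTC", "ASML", "SMH", "SOXX", "MSFT", "GOOG")
--
--
-- def _risk_mapping_for(topics, text):
--     ts = frozenset(topics)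
--     chip = not ts.isdisjoint(("export_controls", "sanctions", "china_technology", "ai_policy"))
--     taiwan = "taiwan_geopolitics" in ts
--     trade = "trade_policy" in ts
--
--     risk_ids = (("ai_chip_export_control_upgrade",) if chip else ()) + \
--                (("taiwan_geopolitical_escalation",) if taiwan else ())
--
--     # nodes: the deduplicated union, built directly per flag combination
--     if chip:
--         nodes = ("export_controls", "gpu_asic_demand", "semiconductor_equipment")
--         if taiwan:
--             nodes += ("foundry_demand", "advanced_packaging")
--     elif taiwan:
--         nodes = ("foundry_demand", "advanced_packaging", "export_controls")
--     elif trade: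
--         nodes = ("export_controls",)
--     else:
--         nodes = ()
--
--     # tickers: deduplicated topic-driven base, then unseen watchlist hits (watchlist has no duplicates)
--     if chip:
--         base = ("NVDA", "AMD", "TSM", "INTC", "SMH", "SOXX") if taiwan else ("NVDA", "AMD", "TSM", "INTC")
--     else:
--         base = ("TSM", "NVDA", "AMD", "SMH", "SOXX") if taiwan else ()
--     upper = text.upper()
--     tickers = base + tuple(t for t in _WATCHLIST if t in upper and t not in base)
--
--     return (risk_ids, tickers, nodes)
-- ===== Notes on version B (the rewrite author's own statement) =====
-- stated objective: alternative
-- what changed: B eliminates A's accumulate-then-generic-dedupe pipeline entirely: it case-splits on the three topic flags and emits each already-deduplicated risk/node/ticker list as a hand-merged constant, then merges the text-scanned watchlist hits with a single not-in-base membership filter (correct because the watchlist itself has no duplicates), so no seen-set dedupe pass exists in B.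
import Mathlib
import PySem

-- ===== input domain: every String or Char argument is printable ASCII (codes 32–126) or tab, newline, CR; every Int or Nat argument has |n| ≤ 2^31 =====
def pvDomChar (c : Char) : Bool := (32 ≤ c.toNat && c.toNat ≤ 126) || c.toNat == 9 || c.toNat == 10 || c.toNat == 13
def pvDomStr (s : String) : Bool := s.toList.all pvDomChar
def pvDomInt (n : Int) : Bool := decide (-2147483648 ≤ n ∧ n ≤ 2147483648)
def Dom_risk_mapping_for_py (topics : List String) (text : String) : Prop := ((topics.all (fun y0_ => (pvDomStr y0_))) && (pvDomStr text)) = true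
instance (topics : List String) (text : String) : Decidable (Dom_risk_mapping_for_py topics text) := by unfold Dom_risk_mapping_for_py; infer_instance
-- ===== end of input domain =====

-- B builds each already-deduplicated output directly from a case analysis on the three topic
-- flags (hand-merged constants) and merges text-scanned tickers with one not-in-base filter,
-- eliminating A's generic seen-set dedupe pass (alternative decomposition, same cost).


-- ===== PORT A =====
-- _dedupe_tuple: seen-set loop, appends value when nonempty and unseen
def pvDedupeA (values : List String) : List String :=
  (values.foldl
    (fun (acc : PySem.Set String × List String) value =>
      if value != "" && !(PySem.Set.contains acc.1 value) then
        (PySem.Set.add acc.1 value, acc.2 ++ [value])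
      else acc)
    (PySem.Set.empty, [])).2

def risk_mapping_for_py (topics : List String) (text : String) : List String × List String × List String :=
  let risk_ids : List String := []
  let nodes : List String := []
  let tickers : List String := []
  let topic_set : PySem.Set String := PySem.Set.ofList topics
  let (risk_ids, nodes, tickers) :=
    if PySem.Set.inter topic_set (PySem.Set.ofList ["export_controls", "sanctions", "china_technology", "ai_policy"]) ≠ [] then
      (risk_ids ++ ["ai_chip_export_control_upgrade"],
       nodes ++ ["export_controls", "gpu_asic_demand", "semiconductor_equipment"],
       tickers ++ ["NVDA", "AMD", "TSM", "INTC"])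
    else (risk_ids, nodes, tickers)
  let (risk_ids, nodes, tickers) :=
    if PySem.Set.contains topic_set "taiwan_geopolitics" then
      (risk_ids ++ ["taiwan_geopolitical_escalation"],
       nodes ++ ["foundry_demand", "advanced_packaging", "export_controls"],
       tickers ++ ["TSM", "NVDA", "AMD", "SMH", "SOXX"])
    else (risk_ids, nodes, tickers)
  let nodes :=
    if PySem.Set.contains topic_set "trade_policy" then nodes ++ ["export_controls"] else nodes
  let upper_text := PySem.Str.upper text
  let tickers :=
    ["NVDA", "AMD", "TSM", "INTC", "ASML", "SMH", "SOXX", "MSFT", "GOOG"].foldl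
      (fun acc ticker => if PySem.Str.isIn ticker upper_text then acc ++ [ticker] else acc) tickers
  (pvDedupeA risk_ids, pvDedupeA tickers, pvDedupeA nodes)

-- ===== PORT B =====
def pvTickerWatchlist : List String :=
  ["NVDA", "AMD", "TSM", "INTC", "ASML", "SMH", "SOXX", "MSFT", "GOOG"]

def risk_mapping_for_py_alt (topics : List String) (text : String) : List String × List String × List String :=
  let ts : PySem.Set String := PySem.Set.ofList topics
  let chip := !(PySem.Set.isdisjoint ts ["export_controls", "sanctions", "china_technology", "ai_policy"])
  let taiwan := PySem.Set.contains ts "taiwan_geopolitics"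
  let trade := PySem.Set.contains ts "trade_policy"
  let risk_ids :=
    (if chip then ["ai_chip_export_control_upgrade"] else []) ++
    (if taiwan then ["taiwan_geopolitical_escalation"] else [])
  -- nodes: the deduplicated union, built directly per flag combination
  let nodes :=
    if chip then
      let nodes := ["export_controls", "gpu_asic_demand", "semiconductor_equipment"]
      if taiwan then nodes ++ ["foundry_demand", "advanced_packaging"] else nodes
    else if taiwan then ["foundry_demand", "advanced_packaging", "export_controls"]
    else if trade then ["export_controls"]
    else []
  -- tickers: deduplicated topic-driven base, then unseen watchlist hits (watchlist has no duplicates)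
  let base :=
    if chip then
      if taiwan then ["NVDA", "AMD", "TSM", "INTC", "SMH", "SOXX"] else ["NVDA", "AMD", "TSM", "INTC"]
    else
      if taiwan then ["TSM", "NVDA", "AMD", "SMH", "SOXX"] else []
  let upper := PySem.Str.upper text
  let tickers :=
    base ++ pvTickerWatchlist.filter (fun t => PySem.Str.isIn t upper && !(PySem.Set.contains base t))
  (risk_ids, tickers, nodes)

-- ===== PRECONDITION & SPEC =====
def Spec_risk_mapping_for_py (topics : List String) (text : String) (out : List String × List String × List String) : Prop := out = risk_mapping_for_py_alt topics text
instance (topics : List String) (text : String) (out : List String × List String × List String) : Decidable (Spec_risk_mapping_for_py topics text out) := by unfold Spec_risk_mapping_for_py; infer_instance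

-- ===== CLAIM =====
def Claim_equal_risk_mapping_for_py : Prop := ∀ (topics : List String) (text : String), Dom_risk_mapping_for_py topics text → Spec_risk_mapping_for_py topics text (risk_mapping_for_py topics text)

-- ===== LEMMAS AND PROOFS =====
theorem pvDedupeA_go (vs : List String) (r : PySem.Set String) :
    (vs.foldl
      (fun (acc : PySem.Set String × List String) value =>
        if value != "" && !(PySem.Set.contains acc.1 value) then
          (PySem.Set.add acc.1 value, acc.2 ++ [value])
        else acc)
      (r, r)).2
    = (vs.filter (fun v => v != "")).foldl PySem.Set.add r := by
  induction vs generalizing r with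
  | nil => rfl
  | cons v vs ih =>
    by_cases hv : v = ""
    · subst hv; simpa using ih r
    · have hv' : (v != "") = true := by simp [hv]
      by_cases hc : PySem.Set.contains r v
      · have hmem : v ∈ r := (PySem.Set.contains_iff r v).1 hc
        simp only [List.foldl_cons, List.filter_cons, hv', hc, Bool.not_true, Bool.and_false,
          PySem.Set.add_of_mem hmem, if_pos]
        exact ih r
      · have hc' : PySem.Set.contains r v = false := by simpa using hc
        have hnmem : v ∉ r := by
          intro h; exact hc ((PySem.Set.contains_iff r v).2 h)
        simp only [List.foldl_cons, List.filter_cons, hv', hc', Bool.not_false, Bool.and_true,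
          if_pos, PySem.Set.add_of_not_mem hnmem]
        exact ih (r ++ [v])

theorem pvDedupeA_eq_ofList (vs : List String) :
    pvDedupeA vs = PySem.Set.ofList (vs.filter (fun v => v != "")) := by
  unfold pvDedupeA
  rw [show (PySem.Set.empty : PySem.Set String) = ([] : List String) from rfl]
  rw [pvDedupeA_go vs []]
  simp [PySem.Set.ofList_eq_foldl]

theorem foldl_add_filter (l : List String) (s : List String) (hl : l.Nodup) :
    l.foldl PySem.Set.add s = s ++ l.filter (fun t => !(PySem.Set.contains s t)) := by
  induction l generalizing s with
  | nil => simp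
  | cons x l ih =>
    rcases List.nodup_cons.1 hl with ⟨hx, hl'⟩
    by_cases hm : x ∈ s
    · have hc : PySem.Set.contains s x = true := (PySem.Set.contains_iff s x).2 hm
      simp only [List.foldl_cons, PySem.Set.add_of_mem hm, List.filter_cons, hc, Bool.not_true]
      exact ih s hl'
    · have hc : PySem.Set.contains s x = false := by
        by_contra h
        exact hm ((PySem.Set.contains_iff s x).1 (by simpa using h))
      simp only [List.foldl_cons, PySem.Set.add_of_not_mem hm, List.filter_cons, hc,
        Bool.not_false, if_true]
      rw [ih (s ++ [x]) hl', List.append_assoc, List.singleton_append]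
      congr 1
      congr 1
      apply List.filter_congr
      intro t ht
      have htx : t ≠ x := fun h => hx (h ▸ ht)
      have : PySem.Set.contains (s ++ [x]) t = PySem.Set.contains s t := by
        by_cases hts : t ∈ s
        · rw [(PySem.Set.contains_iff _ _).2 (List.mem_append_left _ hts),
            (PySem.Set.contains_iff _ _).2 hts]
        · have hn1 : t ∉ s ++ [x] := by simp [hts, htx]
          have c1 : PySem.Set.contains (s ++ [x]) t = false := by
            cases hcc : PySem.Set.contains (s ++ [x]) t with
            | false => rfl
            | true => exact absurd ((PySem.Set.contains_iff _ _).1 hcc) hn1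
          have c2 : PySem.Set.contains s t = false := by
            cases hcc : PySem.Set.contains s t with
            | false => rfl
            | true => exact absurd ((PySem.Set.contains_iff _ _).1 hcc) hts
          rw [c1, c2]
      rw [this]

theorem tickers_merge (baseA base : List String) (p : String → Bool) (watch : List String)
    (hwnd : watch.Nodup) (hwne : ∀ t ∈ watch, (t != "") = true)
    (hof : PySem.Set.ofList baseA = base)
    (hne : ∀ t ∈ baseA, (t != "") = true) :
    pvDedupeA (baseA ++ watch.filter p)
      = base ++ watch.filter (fun t => p t && !(PySem.Set.contains base t)) := by
  rw [pvDedupeA_eq_ofList, List.filter_append]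
  have h1 : baseA.filter (fun v => v != "") = baseA := List.filter_eq_self.2 hne
  have h2 : (watch.filter p).filter (fun v => v != "") = watch.filter p := by
    apply List.filter_eq_self.2
    intro t ht
    exact hwne t (List.mem_of_mem_filter ht)
  rw [h1, h2, PySem.Set.ofList_eq_foldl, List.foldl_append, ← PySem.Set.ofList_eq_foldl, hof]
  rw [foldl_add_filter _ base (hwnd.filter p), List.filter_filter]
  congr 1
  exact List.filter_congr (fun t _ => by rw [Bool.and_comm])

theorem chip_cond_iff (topics : List String) :
    (PySem.Set.inter (PySem.Set.ofList topics)
        (PySem.Set.ofList ["export_controls", "sanctions", "china_technology", "ai_policy"]) ≠ [])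
      ↔ ("export_controls" ∈ topics ∨ "sanctions" ∈ topics ∨ "china_technology" ∈ topics ∨ "ai_policy" ∈ topics) := by
  constructor
  · intro h
    rcases List.exists_mem_of_ne_nil _ h with ⟨x, hx⟩
    have hx' := (PySem.Set.mem_inter _ _ x).1 hx
    have hxt : x ∈ topics := (PySem.Set.mem_ofList _ _).1 hx'.1
    have hxl : x ∈ (["export_controls", "sanctions", "china_technology", "ai_policy"] : List String) :=
      (PySem.Set.mem_ofList _ _).1 hx'.2
    fin_cases hxl <;> simp_all
  · intro h hnil
    have : ∃ x, x ∈ PySem.Set.inter (PySem.Set.ofList topics)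
        (PySem.Set.ofList ["export_controls", "sanctions", "china_technology", "ai_policy"]) := by
      rcases h with h | h | h | h <;>
        exact ⟨_, (PySem.Set.mem_inter _ _ _).2
          ⟨(PySem.Set.mem_ofList _ _).2 h, (PySem.Set.mem_ofList _ _).2 (by simp)⟩⟩
    rcases this with ⟨x, hx⟩
    simp [hnil] at hx

theorem chip_cond_iff_b (topics : List String) :
    ((!(PySem.Set.isdisjoint (PySem.Set.ofList topics)
        (["export_controls", "sanctions", "china_technology", "ai_policy"] : List String))) = true)
      ↔ ("export_controls" ∈ topics ∨ "sanctions" ∈ topics ∨ "china_technology" ∈ topics ∨ "ai_policy" ∈ topics) := by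
  rw [Bool.not_eq_true']
  constructor
  · intro h
    have hne : ¬ (∀ x ∈ PySem.Set.ofList topics,
        x ∉ (["export_controls", "sanctions", "china_technology", "ai_policy"] : List String)) := by
      intro hall
      have := (PySem.Set.isdisjoint_iff _ _).2 hall
      simp [this] at h
    push_neg at hne
    rcases hne with ⟨x, hx, hxl⟩
    have hxt : x ∈ topics := (PySem.Set.mem_ofList _ _).1 hx
    fin_cases hxl <;> simp_all
  · intro h
    by_contra hb
    have hd : PySem.Set.isdisjoint (PySem.Set.ofList topics)
        (["export_controls", "sanctions", "china_technology", "ai_policy"] : List String) = true := by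
      cases hxv : PySem.Set.isdisjoint (PySem.Set.ofList topics)
          (["export_controls", "sanctions", "china_technology", "ai_policy"] : List String) with
      | false => exact absurd hxv hb
      | true => rfl
    have hall := (PySem.Set.isdisjoint_iff _ _).1 hd
    rcases h with h | h | h | h <;>
      exact hall _ ((PySem.Set.mem_ofList _ _).2 h) (by simp)

-- ===== VERDICT =====
theorem risk_mapping_for_py_spec : Claim_equal_risk_mapping_for_py := by
  intro topics text _
  unfold Spec_risk_mapping_for_py risk_mapping_for_py risk_mapping_for_py_alt
  simp only []
  rw [PySem.List.foldl_append_if_eq_filter]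
  by_cases h1 : "export_controls" ∈ topics ∨ "sanctions" ∈ topics ∨ "china_technology" ∈ topics ∨ "ai_policy" ∈ topics <;>
  by_cases h2 : "taiwan_geopolitics" ∈ topics <;>
  by_cases h3 : "trade_policy" ∈ topics <;>
    [skip; skip; skip; skip; skip; skip; skip; skip] <;>
  · simp only [chip_cond_iff, chip_cond_iff_b, PySem.Set.contains_iff, PySem.Set.mem_ofList,
      h1, h2, h3, if_true, if_false, not_true, not_false_iff, iff_true, iff_false,
      eq_self_iff_true]
    simp only [Prod.mk.injEq]
    refine ⟨by decide, ?_, by decide⟩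
    exact tickers_merge _ _ _ _ (by decide) (by decide) (by decide) (by decide)
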